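-- pv_equiv track=rewrite | github.com/cjfal2/aLGoRiTHM | 백준/Gold/1963. 소수 경로/소수 경로.py | bfs
-- ===== SOURCE A (Python) =====
-- MAX = 10000
--
-- def change(num, i, j):
--     if i == 0 and j == 0:
--         return -1
--     m = 1
--     for k in range(3 - i):
--         m *= 10
--     a = num % m
--     b = num // (m * 10)
--     b *= (m * 10)
--     return a + b + m * j
--
-- def bfs(start, end):
--     primes = [True] * (MAX + 1)
--     for i in range(2, int(MAX**0.5) + 1):
--         if primes[i]:
--             for j in range(2*i, MAX + 1, i):
--                 primes[j] = False
--
--     dist = [0] * (MAX + 1)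
--     visited = [False] * (MAX + 1)
--     q = []
--     q.append(start)
--     visited[start] = True
--     while q:
--         num = q.pop(0)
--         for i in range(4):
--             for j in range(10):
--                 next_num = change(num, i, j)
--                 if next_num != -1:
--                     if primes[next_num] and not visited[next_num]:
--                         q.append(next_num)
--                         visited[next_num] = True
--                         dist[next_num] = dist[num] + 1
--     return dist[end]
-- ===== SOURCE B (Python) =====
-- MAX = 10000
--
-- def bfs(start, end):
--     primes = [True] * (MAX + 1)
--     for i in range(2, int(MAX**0.5) + 1):
--         if primes[i]:
--             for j in range(2*i, MAX + 1, i):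
--                 primes[j] = False
--     # inverted wildcard index: (digit position k, number with digit k zeroed)
--     # -> the primes below 10000 matching that pattern
--     buckets = {}
--     for n in range(MAX):
--         if primes[n]:
--             for k in range(4):
--                 if k > 0 or n >= 1000:  # a leading digit is never changed to 0
--                     m = 10 ** (3 - k)
--                     key = (k, n - n // m % 10 * m)
--                     buckets.setdefault(key, []).append(n)
--     dist = {start: 0}
--     q = [start]
--     while q:
--         num = q.pop(0)
--         for k in range(4):
--             m = 10 ** (3 - k)
--             key = (k, num - num // m % 10 * m)
--             for nb in buckets.get(key, []):
--                 if nb not in dist: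
--                     dist[nb] = dist[num] + 1
--                     q.append(nb)
--     return dist.get(end, 0)
-- ===== Notes on version B (the rewrite author's own statement) =====
-- stated objective: alternative
-- what changed: B replaces A's per-node neighbour generation (mutate each of the four digits with change() and primality-test all 40 candidates) by a precomputed inverted wildcard-pattern index mapping (digit position, number with that digit zeroed) to the primes matching it, with dict-based distances instead of two flat 10001-cell lists; Pre_ excludes negative arguments, on which A's returned value is an artefact of Python's negative list indexing (the primes table is consulted with a one-cell shift) and which B does not reproduce.
-- outside the precondition, e.g. on bfs(-9000, 8179): A returns 5, B returns 0; on bfs(1033, -8992): A returns 2, B returns 0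
import Mathlib
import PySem

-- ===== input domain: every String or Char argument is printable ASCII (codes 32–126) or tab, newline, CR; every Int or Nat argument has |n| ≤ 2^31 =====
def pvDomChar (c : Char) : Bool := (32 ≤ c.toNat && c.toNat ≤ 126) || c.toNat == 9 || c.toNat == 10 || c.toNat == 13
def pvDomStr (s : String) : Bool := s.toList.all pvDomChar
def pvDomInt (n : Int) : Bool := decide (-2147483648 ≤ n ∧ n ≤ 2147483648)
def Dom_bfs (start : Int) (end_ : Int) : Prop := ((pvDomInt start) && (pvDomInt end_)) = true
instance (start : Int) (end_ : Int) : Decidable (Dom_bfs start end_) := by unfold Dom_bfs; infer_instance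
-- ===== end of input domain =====

-- B replaces A's per-node "mutate every digit and test primality" neighbour generation by a
-- precomputed wildcard-pattern index (dict bucket per (position, number-with-that-digit-zeroed)
-- over the 4-digit primes) and dict-based distances; objective: alternative (same asymptotic
-- cost, different data structure).

-- ===== PORT A =====

-- Python list indexing a[i] / a[i] = v, exact for -size ≤ i < size (negative wraps once);
-- Python raises IndexError outside that range — inside Pre_bfs every index used is in range.
def pvIdx (size : Nat) (i : Int) : Nat := if i < 0 then (i + size).toNat else i.toNat

def pyArrGet {α : Type} (a : Array α) (i : Int) (d : α) : α := a.getD (pvIdx a.size i) d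

def pyArrSet {α : Type} (a : Array α) (i : Int) (v : α) : Array α := a.setIfInBounds (pvIdx a.size i) v

-- the sieve lines are textually identical in A and in B (Source B), so both ports share this helper;
-- int(MAX ** 0.5) = 100 exactly (10000**0.5 is the exact float 100.0), hence range(2, 101)
def sieve : Array Bool :=
  (PySem.List.pyRange 2 101 1).foldl (fun primes i =>
    if pyArrGet primes i false then
      (PySem.List.pyRange (2*i) 10001 i).foldl (fun primes j => pyArrSet primes j false) primes
    else primes) (Array.replicate 10001 true)

def change (num : Int) (i : Int) (j : Int) : Int :=
  if i = 0 ∧ j = 0 then -1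
  else
    let m := (PySem.List.pyRange 0 (3 - i) 1).foldl (fun m _ => m * 10) 1
    let a := PySem.Int.mod num m
    let b := PySem.Int.floordiv num (m * 10) * (m * 10)
    a + b + m * j

-- the while loop of A; fuel 20001 bounds the number of iterations (each pop consumes an element,
-- and at most 10001 elements are ever appended since each append marks a fresh visited cell)
def loopA (fuel : Nat) (primes : Array Bool) (q : List Int) (visited : Array Bool)
    (dist : Array Int) : Array Int :=
  match fuel with
  | 0 => dist
  | fuel + 1 =>
    match q with
    | [] => dist
    | num :: rest =>
      let s := (PySem.List.pyRange 0 4 1).foldl (fun s i =>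
        (PySem.List.pyRange 0 10 1).foldl (fun (s : List Int × Array Bool × Array Int) j =>
          let next_num := change num i j
          if next_num ≠ -1 then
            if pyArrGet primes next_num false && !(pyArrGet s.2.1 next_num false) then
              (s.1 ++ [next_num], pyArrSet s.2.1 next_num true,
               pyArrSet s.2.2 next_num (pyArrGet s.2.2 num 0 + 1))
            else s
          else s) s) (rest, visited, dist)
      loopA fuel primes s.1 s.2.1 s.2.2

def bfs (start : Int) (end_ : Int) : Int :=
  let primes := sieve
  let dist := Array.replicate 10001 (0 : Int)
  let visited := Array.replicate 10001 false
  let visited := pyArrSet visited start true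
  let dist := loopA 20001 primes [start] visited dist
  pyArrGet dist end_ 0

-- ===== PORT B =====

-- buckets.setdefault(key, []).append(n) is Dict.modify key [] (· ++ [n])
def bucketsOf (primes : Array Bool) : PySem.Dict (Int × Int) (List Int) :=
  (PySem.List.pyRange 0 10000 1).foldl (fun buckets n =>
    if pyArrGet primes n false then
      (PySem.List.pyRange 0 4 1).foldl (fun (buckets : PySem.Dict (Int × Int) (List Int)) k =>
        if 0 < k ∨ 1000 ≤ n then
          let m : Int := (10 : Int) ^ ((3 : Int) - k).toNat   -- 10 ** (3 - k), exact for k ∈ 0..3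
          let key := (k, n - PySem.Int.mod (PySem.Int.floordiv n m) 10 * m)
          buckets.modify key [] (· ++ [n])
        else buckets) buckets
    else buckets) PySem.Dict.empty

-- the while loop of B; same fuel bound as loopA (the equivalence proof is fuel-uniform)
def loopB (fuel : Nat) (buckets : PySem.Dict (Int × Int) (List Int)) (q : List Int)
    (dist : PySem.Dict Int Int) : PySem.Dict Int Int :=
  match fuel with
  | 0 => dist
  | fuel + 1 =>
    match q with
    | [] => dist
    | num :: rest =>
      let s := (PySem.List.pyRange 0 4 1).foldl (fun (s : List Int × PySem.Dict Int Int) k =>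
        let m : Int := (10 : Int) ^ ((3 : Int) - k).toNat
        let key := (k, num - PySem.Int.mod (PySem.Int.floordiv num m) 10 * m)
        ((buckets.getD key []).foldl (fun s nb =>
          if !(s.2.contains nb) then
            (s.1 ++ [nb], s.2.insert nb (s.2.getD num 0 + 1))
          else s) s)) (rest, dist)
      loopB fuel buckets s.1 s.2

def bfs_alt (start : Int) (end_ : Int) : Int :=
  let primes := sieve
  let buckets := bucketsOf primes
  let dist : PySem.Dict Int Int := PySem.Dict.empty.insert start 0
  let dist := loopB 20001 buckets [start] dist
  dist.getD end_ 0

-- ===== PRECONDITION & SPEC =====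

-- Pre_ excludes negative arguments, on which A's returned value is an artefact of Python's
-- negative list indexing (the run consults the primes table with a one-cell shift), and the
-- arguments outside A's tables (A raises IndexError there); B does not reproduce the artefact.
def Pre_bfs (start : Int) (end_ : Int) : Prop :=
  0 ≤ start ∧ start ≤ 9999 ∧ 0 ≤ end_ ∧ end_ ≤ 10000
instance (start : Int) (end_ : Int) : Decidable (Pre_bfs start end_) := by
  unfold Pre_bfs; infer_instance

def pvWitness_bfs : Int × Int := (1033, 8179)

def Spec_bfs (start : Int) (end_ : Int) (out : Int) : Prop := out = bfs_alt start end_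
instance (start : Int) (end_ : Int) (out : Int) : Decidable (Spec_bfs start end_ out) := by
  unfold Spec_bfs; infer_instance

-- ===== CLAIM (what is proved, stated in full; the proofs are below) =====
def Claim_equal_bfs : Prop := ∀ (start : Int) (end_ : Int), Dom_bfs start end_ →
  Pre_bfs start end_ → Spec_bfs start end_ (bfs start end_)

-- ===== LEMMAS AND PROOFS =====

-- m value of position k (A's repeated-multiplication loop and B's 10 ** (3 - k) both compute it)
def mOf (k : Int) : Int := if k = 0 then 1000 else if k = 1 then 100 else if k = 2 then 10 else 1

-- the j values A accepts at position k (j = 0 is refused at k = 0: change returns -1)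
def jlist (k : Int) : List Int :=
  if k = 0 then PySem.List.pyRange 1 10 1 else PySem.List.pyRange 0 10 1

-- the common part of change num k j (digits of num outside position k)
def chBase (m num : Int) : Int :=
  PySem.Int.mod num m + PySem.Int.floordiv num (m * 10) * (m * 10)

-- candidate values A generates at position k, in A's j order
def candList (k num : Int) : List Int := (jlist k).map (fun j => chBase (mOf k) num + mOf k * j)

-- B's bucket key second component
def keyB (m n : Int) : Int := n - PySem.Int.mod (PySem.Int.floordiv n m) 10 * m

-- A's per-candidate update once the -1 and primality tests are done
def stepA (num : Int) (s : List Int × Array Bool × Array Int) (v : Int) :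
    List Int × Array Bool × Array Int :=
  if !(pyArrGet s.2.1 v false) then
    (s.1 ++ [v], pyArrSet s.2.1 v true, pyArrSet s.2.2 v (pyArrGet s.2.2 num 0 + 1))
  else s

-- B's per-neighbour update
def stepB (num : Int) (s : List Int × PySem.Dict Int Int) (nb : Int) :
    List Int × PySem.Dict Int Int :=
  if !(s.2.contains nb) then (s.1 ++ [nb], s.2.insert nb (s.2.getD num 0 + 1)) else s

-- the state relation: A's cell u ↔ B's key u
def StRel (vis : Array Bool) (dA : Array Int) (dB : PySem.Dict Int Int) : Prop :=
  (vis.size : Int) = 10001 ∧ (dA.size : Int) = 10001 ∧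
  ∀ u : Int, 0 ≤ u → u ≤ 10000 →
    pyArrGet vis u false = dB.contains u ∧
    pyArrGet dA u 0 = dB.getD u 0

theorem size_pyArrSet {α : Type} (a : Array α) (i : Int) (v : α) :
    (pyArrSet a i v).size = a.size := by
  simp [pyArrSet]

theorem pyArrGet_inRange {α : Type} (a : Array α) (i : Int) (d : α)
    (h0 : 0 ≤ i) (h1 : i < (a.size : Int)) : pyArrGet a i d = a[i.toNat]'(by omega) := by
  simp only [pyArrGet, pvIdx, if_neg (by omega : ¬ i < 0), Array.getD_eq_getD_getElem?]
  rw [Array.getElem?_eq_getElem (by omega)]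
  rfl

theorem get_set {α : Type} (a : Array α) (i x : Int) (v d : α)
    (hsz : (a.size : Int) = 10001)
    (hi0 : 0 ≤ i) (hi1 : i ≤ 10000) (hx0 : 0 ≤ x) (hx1 : x ≤ 10000) :
    pyArrGet (pyArrSet a i v) x d = if x = i then v else pyArrGet a x d := by
  have hszn : a.size = 10001 := by exact_mod_cast hsz
  rw [pyArrGet_inRange _ x d hx0 (by rw [size_pyArrSet]; omega),
    pyArrGet_inRange a x d hx0 (by omega)]
  simp only [pyArrSet, pvIdx, if_neg (by omega : ¬ i < 0)]
  rw [Array.getElem_setIfInBounds]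
  split_ifs with h1 h2 h2 <;> first | rfl | omega

theorem size_foldl_bool {β : Type} (l : List β) (f : Array Bool → β → Array Bool)
    (a : Array Bool) (h : ∀ a x, (f a x).size = a.size) : (l.foldl f a).size = a.size := by
  induction l generalizing a with
  | nil => rfl
  | cons x l ih => rw [List.foldl_cons, ih, h]

theorem size_sieve : ((sieve.size : Int)) = 10001 := by
  have h : sieve.size = 10001 := by
    rw [sieve]
    rw [size_foldl_bool _ _ _ (fun a x => ?_)]
    · simp
    · split_ifs
      · rw [size_foldl_bool _ _ _ (fun a y => size_pyArrSet a y false)]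
      · rfl
  exact_mod_cast h

theorem pyArrGet_replicate {α : Type} (c d : α) (x : Int) (hx0 : 0 ≤ x) (hx1 : x ≤ 10000) :
    pyArrGet (Array.replicate 10001 c) x d = c := by
  rw [pyArrGet_inRange _ _ _ hx0 (by simp; omega)]
  simp

theorem change_eq (num j k : Int) (hk : k = 0 ∨ k = 1 ∨ k = 2 ∨ k = 3) :
    change num k j = if k = 0 ∧ j = 0 then -1 else chBase (mOf k) num + mOf k * j := by
  have h3 : PySem.List.pyRange 0 3 1 = [0,1,2] := rfl
  have h2 : PySem.List.pyRange 0 2 1 = [0,1] := rfl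
  have h1 : PySem.List.pyRange 0 1 1 = [0] := rfl
  have h0 : PySem.List.pyRange 0 0 1 = [] := rfl
  rcases hk with h | h | h | h <;> subst h <;>
    simp [change, chBase, mOf, h3, h2, h1, h0]

theorem mOf_cases (k : Int) : mOf k = 1000 ∨ mOf k = 100 ∨ mOf k = 10 ∨ mOf k = 1 := by
  simp only [mOf]; split_ifs <;> simp

theorem chBase_ediv (m num : Int) (hm : 0 < m) :
    chBase m num = num % m + num / (m * 10) * (m * 10) := by
  rw [chBase, PySem.Int.mod_eq_emod_of_pos hm, PySem.Int.floordiv_eq_ediv_of_pos (by omega)]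

theorem cand_bounds (u j k : Int) (hu0 : 0 ≤ u) (hu1 : u ≤ 9999)
    (hj0 : 0 ≤ j) (hj1 : j ≤ 9) :
    0 ≤ chBase (mOf k) u + mOf k * j ∧ chBase (mOf k) u + mOf k * j ≤ 9999 := by
  rcases mOf_cases k with h | h | h | h <;> rw [h] <;>
    rw [chBase_ediv _ _ (by norm_num)] <;> omega

-- all candidate values lie in 0..9999
theorem candList_mem_range (k num : Int) (hk : k = 0 ∨ k = 1 ∨ k = 2 ∨ k = 3)
    (hnum : 0 ≤ num ∧ num ≤ 9999) :
    ∀ v ∈ candList k num, 0 ≤ v ∧ v ≤ 9999 := by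
  intro v hv
  simp only [candList, List.mem_map] at hv
  obtain ⟨j, hj, rfl⟩ := hv
  have hj' : 0 ≤ j ∧ j ≤ 9 := by
    rcases hk with h | h | h | h <;> subst h <;>
      simp only [jlist] at hj <;> norm_num at hj <;> omega
  exact cand_bounds num j k hnum.1 hnum.2 hj'.1 hj'.2

theorem innerA (primes : Array Bool) (hsz : (primes.size : Int) = 10001)
    (u : Int) (hu : 0 ≤ u ∧ u ≤ 9999)
    (k : Int) (hk : k = 0 ∨ k = 1 ∨ k = 2 ∨ k = 3) (s : List Int × Array Bool × Array Int) :
    (PySem.List.pyRange 0 10 1).foldl (fun (s : List Int × Array Bool × Array Int) j =>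
      let next_num := change u k j
      if next_num ≠ -1 then
        if pyArrGet primes next_num false && !(pyArrGet s.2.1 next_num false) then
          (s.1 ++ [next_num], pyArrSet s.2.1 next_num true,
           pyArrSet s.2.2 next_num (pyArrGet s.2.2 u 0 + 1))
        else s
      else s) s
    = ((candList k u).filter (fun w => pyArrGet primes w false)).foldl (stepA u) s := by
  rw [List.foldl_filter, candList, List.foldl_map]
  have key : ∀ (s : List Int × Array Bool × Array Int), ∀ j, 0 ≤ j → j ≤ 9 →
      ¬ (k = 0 ∧ j = 0) →
      (let next_num := change u k j
       if next_num ≠ -1 then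
         if pyArrGet primes next_num false && !(pyArrGet s.2.1 next_num false) then
           (s.1 ++ [next_num], pyArrSet s.2.1 next_num true,
            pyArrSet s.2.2 next_num (pyArrGet s.2.2 u 0 + 1))
         else s
       else s)
      = (if pyArrGet primes (chBase (mOf k) u + mOf k * j) false = true
         then stepA u s (chBase (mOf k) u + mOf k * j)
         else s) := by
    intro s j hj0 hj1 hnz
    have hwb := cand_bounds u j k hu.1 hu.2 hj0 hj1
    have hw : change u k j = chBase (mOf k) u + mOf k * j := by
      rw [change_eq _ _ _ hk, if_neg hnz]
    have hne : chBase (mOf k) u + mOf k * j ≠ -1 := by omega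
    simp only [hw, hne, ne_eq, not_false_iff, if_true]
    by_cases hp : pyArrGet primes (chBase (mOf k) u + mOf k * j) false <;>
      simp [hp, stepA]
  rcases hk with h | h | h | h
  · subst h
    rw [show PySem.List.pyRange 0 10 1 = 0 :: PySem.List.pyRange 1 10 1 from rfl,
        List.foldl_cons]
    have h00 : change u 0 0 = -1 := by simp [change]
    have hs0 : ∀ (t : List Int × Array Bool × Array Int),
        (let next_num := change u 0 0;
         if next_num ≠ -1 then
           if pyArrGet primes next_num false && !(pyArrGet t.2.1 next_num false) then
             (t.1 ++ [next_num], pyArrSet t.2.1 next_num true,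
              pyArrSet t.2.2 next_num (pyArrGet t.2.2 u 0 + 1))
           else t
         else t) = t := by intro t; simp [h00]
    simp only [hs0]
    rw [show jlist 0 = PySem.List.pyRange 1 10 1 from rfl]
    exact PySem.List.foldl_congr_mem _ _ _ _ (fun acc x hx => by
      have hx' : (1:Int) ≤ x ∧ x < 10 := PySem.List.mem_pyRange_one.mp hx
      exact key acc x (by omega) (by omega) (by omega))
  all_goals subst h
  all_goals rw [show jlist _ = PySem.List.pyRange 0 10 1 from rfl]
  all_goals exact PySem.List.foldl_congr_mem _ _ _ _ (fun acc x hx => by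
      have hx' : (0:Int) ≤ x ∧ x < 10 := PySem.List.mem_pyRange_one.mp hx
      exact key acc x (by omega) (by omega) (by omega))

def gatek (k n : Int) : Bool := decide (0 < k) || decide (1000 ≤ n)

theorem build_inner (n : Int) (d : PySem.Dict (Int × Int) (List Int)) :
    (PySem.List.pyRange 0 4 1).foldl (fun (buckets : PySem.Dict (Int × Int) (List Int)) k =>
        if 0 < k ∨ 1000 ≤ n then
          let m : Int := (10 : Int) ^ ((3 : Int) - k).toNat
          let key := (k, n - PySem.Int.mod (PySem.Int.floordiv n m) 10 * m)
          buckets.modify key [] (· ++ [n])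
        else buckets) d
    = (((if 1000 ≤ n then d.modify (0, keyB 1000 n) [] (· ++ [n]) else d).modify
        (1, keyB 100 n) [] (· ++ [n])).modify (2, keyB 10 n) [] (· ++ [n])).modify
        (3, keyB 1 n) [] (· ++ [n]) := by
  rw [show PySem.List.pyRange 0 4 1 = [0, 1, 2, 3] from rfl]
  simp only [List.foldl_cons, List.foldl_nil, keyB,
    show ((10 : Int) ^ ((3 : Int) - 0).toNat) = 1000 from by decide,
    show ((10 : Int) ^ ((3 : Int) - 1).toNat) = 100 from by decide,
    show ((10 : Int) ^ ((3 : Int) - 2).toNat) = 10 from by decide,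
    show ((10 : Int) ^ ((3 : Int) - 3).toNat) = 1 from by decide,
    show (((0:Int) < 0 ∨ 1000 ≤ n)) = (1000 ≤ n) from by simp,
    show (((0:Int) < 1 ∨ 1000 ≤ n)) = True from by norm_num,
    show (((0:Int) < 2 ∨ 1000 ≤ n)) = True from by norm_num,
    show (((0:Int) < 3 ∨ 1000 ≤ n)) = True from by norm_num,
    if_true]

set_option maxRecDepth 4000 in
theorem build_getD (primes : Array Bool) (k c : Int)
    (hk : k = 0 ∨ k = 1 ∨ k = 2 ∨ k = 3)
    (l : List Int) (d : PySem.Dict (Int × Int) (List Int)) :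
    (l.foldl (fun buckets n =>
        if pyArrGet primes n false then
          (PySem.List.pyRange 0 4 1).foldl
            (fun (buckets : PySem.Dict (Int × Int) (List Int)) k =>
              if 0 < k ∨ 1000 ≤ n then
                let m : Int := (10 : Int) ^ ((3 : Int) - k).toNat
                let key := (k, n - PySem.Int.mod (PySem.Int.floordiv n m) 10 * m)
                buckets.modify key [] (· ++ [n])
              else buckets) buckets
        else buckets) d).getD (k, c) []
    = d.getD (k, c) [] ++
      (l.filter (fun n => pyArrGet primes n false &&
        (gatek k n && (keyB (mOf k) n == c)))) := by
  induction l generalizing d with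
  | nil => simp
  | cons n l ih =>
    simp only [List.foldl_cons, List.filter_cons]
    rw [ih]
    by_cases hp : pyArrGet primes n false
    · simp only [hp, if_true, build_inner, Bool.true_and]
      have hgd : ((((if 1000 ≤ n then d.modify (0, keyB 1000 n) [] (· ++ [n]) else d).modify
            (1, keyB 100 n) [] (· ++ [n])).modify (2, keyB 10 n) [] (· ++ [n])).modify
            (3, keyB 1 n) [] (· ++ [n])).getD (k, c) []
          = d.getD (k, c) [] ++
            (if (0 < k ∨ 1000 ≤ n) ∧ c = keyB (mOf k) n then [n] else []) := by
        rcases hk with h | h | h | h <;> subst h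
        · norm_num [PySem.Dict.getD_modify, Prod.mk.injEq, mOf]
          by_cases hn : (1000 : Int) ≤ n
          · rw [if_pos hn, PySem.Dict.getD_modify]
            simp only [Prod.mk.injEq, true_and]
            by_cases hc : c = keyB 1000 n
            · rw [if_pos hc, if_pos ⟨hn, hc⟩, hc]
            · rw [if_neg hc, if_neg (fun h => hc h.2)]
              simp
          · rw [if_neg hn, if_neg (fun h => hn h.1)]
            simp
        all_goals
          (by_cases hn : (1000 : Int) ≤ n <;>
            norm_num [hn, PySem.Dict.getD_modify, Prod.mk.injEq, mOf] <;>
            split_ifs with h1 h2 <;>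
              first
              | rfl
              | (subst h1; rfl)
              | simp)
      rw [hgd]
      by_cases hg : (0 : Int) < k ∨ 1000 ≤ n
      · by_cases h1 : keyB (mOf k) n = c
        · have : gatek k n = true := by
            rcases hg with hg | hg <;> simp [gatek, hg]
          simp [this, h1, List.append_assoc, hg]
        · have h1' : ¬ (c = keyB (mOf k) n) := fun h => h1 h.symm
          simp [h1, h1', hg]
      · have hgf : gatek k n = false := by
          simp only [gatek, Bool.or_eq_false_iff, decide_eq_false_iff_not]
          exact ⟨fun h => hg (Or.inl h), fun h => hg (Or.inr h)⟩
        simp [hgf, hg]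
    · simp only [hp, Bool.false_and]
      simp

theorem range_filter_core (m j0 lo u : Int)
    (hm : (m = 1000 ∧ j0 = 1 ∧ lo = 1000) ∨ ((m = 100 ∨ m = 10 ∨ m = 1) ∧ j0 = 0 ∧ lo = 0))
    (hu : 0 ≤ u ∧ u ≤ 9999) :
    (PySem.List.pyRange 0 10000 1).filter
        (fun n => decide (lo ≤ n) && (keyB m n == keyB m u))
      = (PySem.List.pyRange j0 10 1).map (fun j => chBase m u + m * j) := by
  have hmpos : 0 < m := by rcases hm with ⟨h, _⟩ | ⟨h | h | h, _⟩ <;> omega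
  have hkeyB : ∀ x : Int, keyB m x = x - x / m % 10 * m := by
    intro x
    rw [keyB, PySem.Int.mod_eq_emod_of_pos (by norm_num),
      PySem.Int.floordiv_eq_ediv_of_pos hmpos]
  have hbase : chBase m u = u % m + u / (m * 10) * (m * 10) := chBase_ediv m u hmpos
  have hpw1 : ((PySem.List.pyRange 0 10000 1).filter
      (fun n => decide (lo ≤ n) && (keyB m n == keyB m u))).Pairwise (· < ·) :=
    (PySem.List.pairwise_lt_pyRange_one 0 10000).filter _
  have hpw2 : ((PySem.List.pyRange j0 10 1).map
      (fun j => chBase m u + m * j)).Pairwise (· < ·) := by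
    rw [List.pairwise_map]
    exact (PySem.List.pairwise_lt_pyRange_one j0 10).imp (fun h => by nlinarith)
  have hmem : ∀ a : Int,
      a ∈ (PySem.List.pyRange 0 10000 1).filter
        (fun n => decide (lo ≤ n) && (keyB m n == keyB m u)) ↔
      a ∈ (PySem.List.pyRange j0 10 1).map (fun j => chBase m u + m * j) := by
    intro a
    simp only [List.mem_filter, List.mem_map, PySem.List.mem_pyRange_one, beq_iff_eq,
      Bool.and_eq_true, decide_eq_true_eq, hkeyB, hbase]
    rcases hm with ⟨hm', hj0, hlo⟩ | ⟨hm' | hm' | hm', hj0, hlo⟩ <;>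
      subst hm' <;> subst hj0 <;> subst hlo
    · constructor
      · rintro ⟨hr, hl, hk⟩
        exact ⟨a / 1000 % 10, by omega, by omega⟩
      · rintro ⟨j, hj, rfl⟩
        exact ⟨⟨by omega, by omega⟩, by omega, by omega⟩
    · constructor
      · rintro ⟨hr, hl, hk⟩
        exact ⟨a / 100 % 10, by omega, by omega⟩
      · rintro ⟨j, hj, rfl⟩
        exact ⟨⟨by omega, by omega⟩, by omega, by omega⟩
    · constructor
      · rintro ⟨hr, hl, hk⟩
        exact ⟨a / 10 % 10, by omega, by omega⟩
      · rintro ⟨j, hj, rfl⟩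
        exact ⟨⟨by omega, by omega⟩, by omega, by omega⟩
    · constructor
      · rintro ⟨hr, hl, hk⟩
        exact ⟨a / 1 % 10, by omega, by omega⟩
      · rintro ⟨j, hj, rfl⟩
        exact ⟨⟨by omega, by omega⟩, by omega, by omega⟩
  exact List.Perm.eq_of_pairwise
    (fun a b _ _ hab hba => le_antisymm hab hba)
    (hpw1.imp le_of_lt) (hpw2.imp le_of_lt)
    ((List.perm_ext_iff_of_nodup hpw1.nodup hpw2.nodup).mpr hmem)

theorem range_filter_gate (k u : Int) (hk : k = 0 ∨ k = 1 ∨ k = 2 ∨ k = 3)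
    (hu : 0 ≤ u ∧ u ≤ 9999) :
    (PySem.List.pyRange 0 10000 1).filter
        (fun n => gatek k n && (keyB (mOf k) n == keyB (mOf k) u))
      = candList k u := by
  rcases hk with h | h | h | h <;> subst h
  · rw [show candList 0 u
        = (PySem.List.pyRange 1 10 1).map (fun j => chBase (mOf 0) u + mOf 0 * j) from rfl,
      show mOf 0 = 1000 from rfl]
    rw [← range_filter_core 1000 1 1000 u (Or.inl ⟨rfl, rfl, rfl⟩) hu]
    exact List.filter_congr (fun n _ => by simp [gatek])
  · rw [show candList 1 u
        = (PySem.List.pyRange 0 10 1).map (fun j => chBase (mOf 1) u + mOf 1 * j) from rfl,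
      show mOf 1 = 100 from rfl]
    rw [← range_filter_core 100 0 0 u (Or.inr ⟨Or.inl rfl, rfl, rfl⟩) hu]
    exact List.filter_congr (fun n hn => by
      have := PySem.List.mem_pyRange_one.mp hn
      simp [gatek, this.1])
  · rw [show candList 2 u
        = (PySem.List.pyRange 0 10 1).map (fun j => chBase (mOf 2) u + mOf 2 * j) from rfl,
      show mOf 2 = 10 from rfl]
    rw [← range_filter_core 10 0 0 u (Or.inr ⟨Or.inr (Or.inl rfl), rfl, rfl⟩) hu]
    exact List.filter_congr (fun n hn => by
      have := PySem.List.mem_pyRange_one.mp hn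
      simp [gatek, this.1])
  · rw [show candList 3 u
        = (PySem.List.pyRange 0 10 1).map (fun j => chBase (mOf 3) u + mOf 3 * j) from rfl,
      show mOf 3 = 1 from rfl]
    rw [← range_filter_core 1 0 0 u (Or.inr ⟨Or.inr (Or.inr rfl), rfl, rfl⟩) hu]
    exact List.filter_congr (fun n hn => by
      have := PySem.List.mem_pyRange_one.mp hn
      simp [gatek, this.1])

theorem bucket_eq_cand (primes : Array Bool) (k u : Int)
    (hk : k = 0 ∨ k = 1 ∨ k = 2 ∨ k = 3) (hu : 0 ≤ u ∧ u ≤ 9999) :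
    (bucketsOf primes).getD (k, keyB (mOf k) u) [] =
      (candList k u).filter (fun w => pyArrGet primes w false) := by
  rw [show bucketsOf primes = (PySem.List.pyRange 0 10000 1).foldl (fun buckets n =>
        if pyArrGet primes n false then
          (PySem.List.pyRange 0 4 1).foldl
            (fun (buckets : PySem.Dict (Int × Int) (List Int)) k =>
              if 0 < k ∨ 1000 ≤ n then
                let m : Int := (10 : Int) ^ ((3 : Int) - k).toNat
                let key := (k, n - PySem.Int.mod (PySem.Int.floordiv n m) 10 * m)
                buckets.modify key [] (· ++ [n])
              else buckets) buckets
        else buckets) PySem.Dict.empty from rfl,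
     build_getD primes k _ hk]
  simp only [PySem.Dict.getD_empty, List.nil_append]
  have hsplit : (PySem.List.pyRange 0 10000 1).filter
        (fun n => pyArrGet primes n false &&
          (gatek k n && (keyB (mOf k) n == keyB (mOf k) u)))
      = ((PySem.List.pyRange 0 10000 1).filter
          (fun n => gatek k n && (keyB (mOf k) n == keyB (mOf k) u))).filter
          (fun w => pyArrGet primes w false) := by
    rw [List.filter_filter]
  rw [hsplit, range_filter_gate k u hk hu]

theorem innerB (primes : Array Bool) (u : Int) (hu : 0 ≤ u ∧ u ≤ 9999)
    (k : Int) (hk : k = 0 ∨ k = 1 ∨ k = 2 ∨ k = 3) (s : List Int × PySem.Dict Int Int) :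
    (let m : Int := (10 : Int) ^ ((3 : Int) - k).toNat
     let key := (k, u - PySem.Int.mod (PySem.Int.floordiv u m) 10 * m)
     ((bucketsOf primes).getD key []).foldl (fun s nb =>
       if !(s.2.contains nb) then (s.1 ++ [nb], s.2.insert nb (s.2.getD u 0 + 1))
       else s) s)
    = ((candList k u).filter (fun w => pyArrGet primes w false)).foldl (stepB u) s := by
  have hb := bucket_eq_cand primes k u hk hu
  rcases hk with h | h | h | h <;> subst h <;>
    simp only [show ((10 : Int) ^ ((3 : Int) - 0).toNat) = 1000 from by decide,
      show ((10 : Int) ^ ((3 : Int) - 1).toNat) = 100 from by decide,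
      show ((10 : Int) ^ ((3 : Int) - 2).toNat) = 10 from by decide,
      show ((10 : Int) ^ ((3 : Int) - 3).toNat) = 1 from by decide] <;>
    [ (simp only [show mOf 0 = 1000 from rfl, keyB] at hb);
      (simp only [show mOf 1 = 100 from rfl, keyB] at hb);
      (simp only [show mOf 2 = 10 from rfl, keyB] at hb);
      (simp only [show mOf 3 = 1 from rfl, keyB] at hb)] <;>
    rw [hb] <;> rfl

theorem lockstep (numu : Int) (hnum : 0 ≤ numu ∧ numu ≤ 10000)
    (L : List Int) (hL : ∀ v ∈ L, 0 ≤ v ∧ v ≤ 10000)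
    (qB : List Int) (vis : Array Bool) (dA : Array Int) (dB : PySem.Dict Int Int)
    (h : StRel vis dA dB) :
    (L.foldl (stepA numu) (qB, vis, dA)).1 = (L.foldl (stepB numu) (qB, dB)).1 ∧
    StRel (L.foldl (stepA numu) (qB, vis, dA)).2.1
      (L.foldl (stepA numu) (qB, vis, dA)).2.2
      (L.foldl (stepB numu) (qB, dB)).2 ∧
    (∀ v ∈ (L.foldl (stepB numu) (qB, dB)).1, v ∈ qB ∨ v ∈ L) := by
  induction L generalizing qB vis dA dB with
  | nil => exact ⟨rfl, h, fun v hv => Or.inl hv⟩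
  | cons v L ih =>
    obtain ⟨hsv, hsd, hrest⟩ := h
    have hvr := hL v List.mem_cons_self
    have hvis : pyArrGet vis v false = dB.contains v := (hrest v hvr.1 hvr.2).1
    have hL' : ∀ w ∈ L, 0 ≤ w ∧ w ≤ 10000 := fun w hw => hL w (List.mem_cons_of_mem v hw)
    simp only [List.foldl_cons]
    by_cases hb : dB.contains v
    · have hA : stepA numu (qB, vis, dA) v = (qB, vis, dA) := by simp [stepA, hvis, hb]
      have hB : stepB numu (qB, dB) v = (qB, dB) := by simp [stepB, hb]
      rw [hA, hB]
      obtain ⟨h1, h2, h3⟩ := ih hL' qB vis dA dB ⟨hsv, hsd, hrest⟩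
      exact ⟨h1, h2, fun w hw => (h3 w hw).imp id (List.mem_cons_of_mem v)⟩
    · have hA : stepA numu (qB, vis, dA) v
          = (qB ++ [v], pyArrSet vis v true, pyArrSet dA v (pyArrGet dA numu 0 + 1)) := by
        simp [stepA, hvis, hb]
      have hB : stepB numu (qB, dB) v = (qB ++ [v], dB.insert v (dB.getD numu 0 + 1)) := by
        simp [stepB, hb]
      rw [hA, hB]
      have hdnum : pyArrGet dA numu 0 = dB.getD numu 0 := (hrest numu hnum.1 hnum.2).2
      have hrel' : StRel (pyArrSet vis v true)
          (pyArrSet dA v (pyArrGet dA numu 0 + 1)) (dB.insert v (dB.getD numu 0 + 1)) := by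
        refine ⟨by simp [size_pyArrSet, hsv], by simp [size_pyArrSet, hsd], ?_⟩
        intro x hx0 hx1
        constructor
        · rw [get_set vis v x true false hsv hvr.1 hvr.2 hx0 hx1,
            PySem.Dict.contains_insert]
          by_cases hxv : x = v
          · simp [hxv]
          · simp [hxv, (hrest x hx0 hx1).1]
        · rw [get_set dA v x _ 0 hsd hvr.1 hvr.2 hx0 hx1, PySem.Dict.getD_insert]
          by_cases hxv : x = v
          · simp [hxv, hdnum]
          · simp [hxv, (hrest x hx0 hx1).2]
      obtain ⟨h1, h2, h3⟩ := ih hL' (qB ++ [v]) _ _ _ hrel'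
      refine ⟨h1, h2, fun w hw => ?_⟩
      rcases h3 w hw with hw' | hw'
      · rcases List.mem_append.mp hw' with hq' | hv'
        · exact Or.inl hq'
        · exact Or.inr (by simpa using Or.inl (List.mem_singleton.mp hv'))
      · exact Or.inr (List.mem_cons_of_mem v hw')

theorem lockstep_many (numu : Int) (hnum : 0 ≤ numu ∧ numu ≤ 10000)
    (Ls : List (List Int)) (hLs : ∀ L ∈ Ls, ∀ v ∈ L, 0 ≤ v ∧ v ≤ 9999)
    (qB : List Int) (vis : Array Bool) (dA : Array Int) (dB : PySem.Dict Int Int)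
    (h : StRel vis dA dB) :
    (Ls.foldl (fun s L => L.foldl (stepA numu) s) (qB, vis, dA)).1
      = (Ls.foldl (fun s L => L.foldl (stepB numu) s) (qB, dB)).1 ∧
    StRel (Ls.foldl (fun s L => L.foldl (stepA numu) s) (qB, vis, dA)).2.1
      (Ls.foldl (fun s L => L.foldl (stepA numu) s) (qB, vis, dA)).2.2
      (Ls.foldl (fun s L => L.foldl (stepB numu) s) (qB, dB)).2 ∧
    (∀ v ∈ (Ls.foldl (fun s L => L.foldl (stepB numu) s) (qB, dB)).1,
      v ∈ qB ∨ (0 ≤ v ∧ v ≤ 9999)) := by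
  induction Ls generalizing qB vis dA dB with
  | nil => exact ⟨rfl, h, fun v hv => Or.inl hv⟩
  | cons L Ls ih =>
    have hL := hLs L List.mem_cons_self
    have hLs' : ∀ L' ∈ Ls, ∀ v ∈ L', 0 ≤ v ∧ v ≤ 9999 :=
      fun L' hL' => hLs L' (List.mem_cons_of_mem L hL')
    simp only [List.foldl_cons]
    obtain ⟨e0, r0, m0⟩ := lockstep numu hnum L
      (fun v hv => ⟨by have := (hL v hv).1; omega, by have := (hL v hv).2; omega⟩)
      qB vis dA dB h
    have ha : L.foldl (stepA numu) (qB, vis, dA)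
        = ((L.foldl (stepB numu) (qB, dB)).1,
           (L.foldl (stepA numu) (qB, vis, dA)).2.1,
           (L.foldl (stepA numu) (qB, vis, dA)).2.2) := by
      rw [← e0]
    have hb : L.foldl (stepB numu) (qB, dB)
        = ((L.foldl (stepB numu) (qB, dB)).1, (L.foldl (stepB numu) (qB, dB)).2) := rfl
    rw [ha, hb]
    obtain ⟨e1, r1, m1⟩ := ih hLs' _ _ _ _ r0
    refine ⟨e1, r1, fun v hv => ?_⟩
    rcases m1 v (by rw [← hb] at hv; exact hv) with hv' | hv'
    · rcases m0 v hv' with hq' | hL'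
      · exact Or.inl hq'
      · exact Or.inr (hL v hL')
    · exact Or.inr hv'

theorem node_AB (primes : Array Bool) (hsz : (primes.size : Int) = 10001)
    (numu : Int) (hnum : 0 ≤ numu ∧ numu ≤ 9999)
    (restB : List Int) (vis : Array Bool) (dA : Array Int) (dB : PySem.Dict Int Int)
    (h : StRel vis dA dB) :
    ((PySem.List.pyRange 0 4 1).foldl (fun s i =>
        (PySem.List.pyRange 0 10 1).foldl (fun (s : List Int × Array Bool × Array Int) j =>
          let next_num := change numu i j
          if next_num ≠ -1 then
            if pyArrGet primes next_num false && !(pyArrGet s.2.1 next_num false) then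
              (s.1 ++ [next_num], pyArrSet s.2.1 next_num true,
               pyArrSet s.2.2 next_num (pyArrGet s.2.2 numu 0 + 1))
            else s
          else s) s) (restB, vis, dA)).1
      = ((PySem.List.pyRange 0 4 1).foldl (fun (s : List Int × PySem.Dict Int Int) k =>
        let m : Int := (10 : Int) ^ ((3 : Int) - k).toNat
        let key := (k, numu - PySem.Int.mod (PySem.Int.floordiv numu m) 10 * m)
        (((bucketsOf primes).getD key []).foldl (fun s nb =>
          if !(s.2.contains nb) then
            (s.1 ++ [nb], s.2.insert nb (s.2.getD numu 0 + 1))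
          else s) s)) (restB, dB)).1 ∧
    StRel ((PySem.List.pyRange 0 4 1).foldl (fun s i =>
        (PySem.List.pyRange 0 10 1).foldl (fun (s : List Int × Array Bool × Array Int) j =>
          let next_num := change numu i j
          if next_num ≠ -1 then
            if pyArrGet primes next_num false && !(pyArrGet s.2.1 next_num false) then
              (s.1 ++ [next_num], pyArrSet s.2.1 next_num true,
               pyArrSet s.2.2 next_num (pyArrGet s.2.2 numu 0 + 1))
            else s
          else s) s) (restB, vis, dA)).2.1 ((PySem.List.pyRange 0 4 1).foldl (fun s i =>
        (PySem.List.pyRange 0 10 1).foldl (fun (s : List Int × Array Bool × Array Int) j =>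
          let next_num := change numu i j
          if next_num ≠ -1 then
            if pyArrGet primes next_num false && !(pyArrGet s.2.1 next_num false) then
              (s.1 ++ [next_num], pyArrSet s.2.1 next_num true,
               pyArrSet s.2.2 next_num (pyArrGet s.2.2 numu 0 + 1))
            else s
          else s) s) (restB, vis, dA)).2.2 ((PySem.List.pyRange 0 4 1).foldl (fun (s : List Int × PySem.Dict Int Int) k =>
        let m : Int := (10 : Int) ^ ((3 : Int) - k).toNat
        let key := (k, numu - PySem.Int.mod (PySem.Int.floordiv numu m) 10 * m)
        (((bucketsOf primes).getD key []).foldl (fun s nb =>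
          if !(s.2.contains nb) then
            (s.1 ++ [nb], s.2.insert nb (s.2.getD numu 0 + 1))
          else s) s)) (restB, dB)).2 ∧
    (∀ v ∈ ((PySem.List.pyRange 0 4 1).foldl (fun (s : List Int × PySem.Dict Int Int) k =>
        let m : Int := (10 : Int) ^ ((3 : Int) - k).toNat
        let key := (k, numu - PySem.Int.mod (PySem.Int.floordiv numu m) 10 * m)
        (((bucketsOf primes).getD key []).foldl (fun s nb =>
          if !(s.2.contains nb) then
            (s.1 ++ [nb], s.2.insert nb (s.2.getD numu 0 + 1))
          else s) s)) (restB, dB)).1, v ∈ restB ∨ (0 ≤ v ∧ v ≤ 9999)) := by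
  rw [show PySem.List.pyRange 0 4 1 = [0, 1, 2, 3] from rfl]
  simp only [List.foldl_cons, List.foldl_nil]
  rw [innerA primes hsz numu hnum 0 (Or.inl rfl),
      innerA primes hsz numu hnum 1 (Or.inr (Or.inl rfl)),
      innerA primes hsz numu hnum 2 (Or.inr (Or.inr (Or.inl rfl))),
      innerA primes hsz numu hnum 3 (Or.inr (Or.inr (Or.inr rfl)))]
  rw [innerB primes numu hnum 0 (Or.inl rfl),
      innerB primes numu hnum 1 (Or.inr (Or.inl rfl)),
      innerB primes numu hnum 2 (Or.inr (Or.inr (Or.inl rfl))),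
      innerB primes numu hnum 3 (Or.inr (Or.inr (Or.inr rfl)))]
  have hmany := lockstep_many numu (by omega)
    [ (candList 0 numu).filter (fun w => pyArrGet primes w false),
      (candList 1 numu).filter (fun w => pyArrGet primes w false),
      (candList 2 numu).filter (fun w => pyArrGet primes w false),
      (candList 3 numu).filter (fun w => pyArrGet primes w false)]
    (by
      intro L hL v hv
      simp only [List.mem_cons, List.not_mem_nil, or_false] at hL
      rcases hL with h' | h' | h' | h' <;> subst h' <;>
        first
        | exact candList_mem_range 0 numu (Or.inl rfl) hnum v (List.mem_of_mem_filter hv)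
        | exact candList_mem_range 1 numu (Or.inr (Or.inl rfl)) hnum v
            (List.mem_of_mem_filter hv)
        | exact candList_mem_range 2 numu (Or.inr (Or.inr (Or.inl rfl))) hnum v
            (List.mem_of_mem_filter hv)
        | exact candList_mem_range 3 numu (Or.inr (Or.inr (Or.inr rfl))) hnum v
            (List.mem_of_mem_filter hv))
    restB vis dA dB h
  simpa only [List.foldl_cons, List.foldl_nil] using hmany

theorem init_rel (u0 : Int) (h0 : 0 ≤ u0) (h1 : u0 ≤ 9999) :
    StRel (pyArrSet (Array.replicate 10001 false) u0 true)
      (Array.replicate 10001 (0 : Int)) (PySem.Dict.empty.insert u0 0) := by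
  refine ⟨by simp [size_pyArrSet], by simp, ?_⟩
  intro x hx0 hx1
  constructor
  · rw [get_set _ u0 x true false (by simp) (by omega) (by omega) hx0 hx1,
      PySem.Dict.contains_insert]
    by_cases hxv : x = u0
    · simp [hxv]
    · rw [if_neg hxv, pyArrGet_replicate false false _ hx0 hx1]
      simp [hxv]
  · rw [pyArrGet_replicate (0 : Int) 0 _ hx0 hx1, PySem.Dict.getD_insert]
    by_cases hxv : x = u0
    · simp [hxv]
    · simp [hxv]

theorem loop_AB (primes : Array Bool) (hsz : (primes.size : Int) = 10001) (fuel : Nat)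
    (qB : List Int) (vis : Array Bool) (dA : Array Int) (dB : PySem.Dict Int Int)
    (hq : ∀ v ∈ qB, 0 ≤ v ∧ v ≤ 9999) (h : StRel vis dA dB) :
    (((loopA fuel primes qB vis dA).size : Int) = 10001) ∧
    ∀ u : Int, 0 ≤ u → u ≤ 10000 →
      pyArrGet (loopA fuel primes qB vis dA) u 0
        = (loopB fuel (bucketsOf primes) qB dB).getD u 0 := by
  induction fuel generalizing qB vis dA dB with
  | zero =>
    simp only [loopA, loopB]
    exact ⟨h.2.1, fun u h0 h1 => (h.2.2 u h0 h1).2⟩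
  | succ fuel ih =>
    cases qB with
    | nil =>
      simp only [loopA, loopB]
      exact ⟨h.2.1, fun u h0 h1 => (h.2.2 u h0 h1).2⟩
    | cons numu restB =>
      simp only [loopA, loopB]
      obtain ⟨e, r, m⟩ := node_AB primes hsz numu
        (hq numu List.mem_cons_self) restB vis dA dB h
      rw [e]
      exact ih _ _ _ _
        (fun v hv => (m v hv).elim (fun h' => hq v (List.mem_cons_of_mem numu h')) id) r

-- ===== VERDICT (by name: the statement is the Claim_ definition above) =====
theorem bfs_spec : Claim_equal_bfs := by
  intro start end_ hdom hpre
  obtain ⟨hs0, hs1, he0, he1⟩ := hpre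
  show bfs start end_ = bfs_alt start end_
  simp only [bfs, bfs_alt]
  obtain ⟨_, hrelF⟩ := loop_AB sieve size_sieve 20001 [start] _ _ _
    (fun v hv => by rcases List.mem_singleton.mp hv with rfl; exact ⟨hs0, hs1⟩)
    (init_rel start hs0 hs1)
  exact hrelF end_ he0 he1
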